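-- pv_equiv track=rewrite | github.com/chiralcentre/Kattis | walls.py | minimum_cranes
-- ===== SOURCE A (Python) =====
-- from itertools import combinations
--
-- def minimum_cranes(cranes,n):
--     for k in range(1,min(n+1,5)): #from 1 crane to 4/n cranes, whichever is smaller
--         choices = combinations(cranes,k)
--         for group in choices:
--             intersection = []
--             for point in group:
--                 intersection.extend(cranes[point])
--             if len(set(intersection)) == 4:
--                 return str(k)
--     return "Impossible"
--
-- cranes = {}
-- ===== SOURCE B (Python) =====
-- def minimum_cranes(cranes, n):
--     # Branch-and-bound DFS over deduplicated point-sets instead of enumerating all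
--     # k-combinations per k: prunes any partial union exceeding 4 distinct points.
--     limit = min(n, 4)
--     sets = [set(v) for v in cranes.values()]
--     m = len(sets)
--
--     def go(i, union, used):
--         if len(union) == 4:
--             return used
--         if used >= limit or i == m:
--             return 5
--         best = go(i + 1, union, used)
--         u2 = union | sets[i]
--         if len(u2) <= 4:
--             best = min(best, go(i + 1, u2, used + 1))
--         return best
--
--     k = go(0, set(), 0)
--     return str(k) if k <= limit else "Impossible"
-- ===== Notes on version B (the rewrite author's own statement) =====
-- stated objective: alternative
-- what changed: Replaces per-k enumeration of all k-combinations (rebuilding each group's point multiset from scratch) by a single recursive branch-and-bound DFS over the cranes' point-sets that shares partial unions and prunes any branch whose union already exceeds 4 distinct points.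
import Mathlib
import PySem

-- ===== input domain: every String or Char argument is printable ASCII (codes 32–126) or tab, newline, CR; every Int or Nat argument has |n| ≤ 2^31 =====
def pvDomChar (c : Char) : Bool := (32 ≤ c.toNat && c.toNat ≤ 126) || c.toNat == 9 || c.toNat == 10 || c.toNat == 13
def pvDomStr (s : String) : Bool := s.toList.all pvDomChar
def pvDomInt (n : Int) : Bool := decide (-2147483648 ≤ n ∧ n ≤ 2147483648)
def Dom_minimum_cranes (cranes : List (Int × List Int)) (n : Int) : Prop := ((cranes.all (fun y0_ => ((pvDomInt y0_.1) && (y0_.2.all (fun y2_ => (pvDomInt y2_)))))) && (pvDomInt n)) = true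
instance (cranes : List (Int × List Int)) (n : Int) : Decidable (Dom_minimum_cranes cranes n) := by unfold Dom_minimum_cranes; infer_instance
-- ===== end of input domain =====

-- B replaces A's per-k enumeration of all k-combinations by a recursive
-- branch-and-bound DFS over the cranes' point-sets with pruning of unions
-- that exceed 4 distinct points (alternative algorithm, same results).


-- ===== PORT A =====
-- test of one combination: len(set(concatenation of the group's point lists)) == 4
def pvTestA (d : PySem.Dict Int (List Int)) (g : List Int) : Bool :=
  (PySem.Set.ofList (g.foldl (fun acc p => acc ++ d.getD p []) [])).length == 4

-- inner 'for group in combinations(cranes, k): … return str(k)' as an any-test per k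
def pvAnyA (d : PySem.Dict Int (List Int)) (k : Int) : Bool :=
  (PySem.List.combinations d.keys k.toNat).any (pvTestA d)

def minimum_cranes (cranes : List (Int × List Int)) (n : Int) : String :=
  let d := PySem.Dict.ofList cranes
  match (PySem.List.pyRange 1 (min (n + 1) 5) 1).find? (pvAnyA d) with
  | some k => PySem.Int.toStr k
  | none => "Impossible"

-- ===== PORT B =====
-- DFS over the remaining point-sets: minimal number of further sets needed to
-- reach a union of exactly 4 distinct points (5 = impossible within `limit`)
def pvGoB (limit : Int) : List (PySem.Set Int) → PySem.Set Int → Int → Int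
  | rest, union, used =>
    if union.length = 4 then used
    else if limit ≤ used then 5
    else
      match rest with
      | [] => 5
      | s :: tail =>
          let skip := pvGoB limit tail union used
          let u2 := PySem.Set.union union s
          if u2.length ≤ 4 then min skip (pvGoB limit tail u2 (used + 1)) else skip

def minimum_cranes_alt (cranes : List (Int × List Int)) (n : Int) : String :=
  let d := PySem.Dict.ofList cranes
  let sets := d.values.map (fun v => PySem.Set.ofList v)
  let k := pvGoB (min n 4) sets [] 0
  if k ≤ min n 4 then PySem.Int.toStr k else "Impossible"

-- ===== PRECONDITION & SPEC =====
def Spec_minimum_cranes (cranes : List (Int × List Int)) (n : Int) (out : String) : Prop := out = minimum_cranes_alt cranes n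
instance (cranes : List (Int × List Int)) (n : Int) (out : String) : Decidable (Spec_minimum_cranes cranes n out) := by unfold Spec_minimum_cranes; infer_instance

-- ===== CLAIM (what is proved, stated in full; the proofs are below) =====
def Claim_equal_minimum_cranes : Prop := ∀ (cranes : List (Int × List Int)) (n : Int), Dom_minimum_cranes cranes n → Spec_minimum_cranes cranes n (minimum_cranes cranes n)


-- ===== LEMMAS AND PROOFS =====

-- length of a duplicate-free list is at most the length of any list containing it
lemma pvLen_le_of_nodup_subset (l1 l2 : List Int) (h1 : l1.Nodup) (h : l1 ⊆ l2) :
    l1.length ≤ l2.length := by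
  calc l1.length = l1.toFinset.card := (List.toFinset_card_of_nodup h1).symm
    _ ≤ l2.toFinset.card := Finset.card_le_card (fun x hx => by
        simp only [List.mem_toFinset] at *; exact h hx)
    _ ≤ l2.length := l2.toFinset_card_le

-- fold of unions, as B's DFS accumulates it along a taken branch
def pvUfold (t : List (PySem.Set Int)) (u : PySem.Set Int) : PySem.Set Int :=
  t.foldl (fun acc s => PySem.Set.union acc s) u

lemma mem_pvUfold (t : List (PySem.Set Int)) (u : PySem.Set Int) (x : Int) :
    x ∈ pvUfold t u ↔ x ∈ u ∨ ∃ s ∈ t, x ∈ s := by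
  induction t generalizing u with
  | nil => simp [pvUfold]
  | cons s t ih =>
      simp only [pvUfold, List.foldl_cons] at *
      rw [ih]
      simp [PySem.Set.mem_union]
      tauto

lemma nodup_pvUfold (t : List (PySem.Set Int)) (u : PySem.Set Int) (hu : u.Nodup) :
    (pvUfold t u).Nodup := by
  induction t generalizing u with
  | nil => exact hu
  | cons s t ih => exact ih (PySem.Set.union u s) (PySem.Set.nodup_union u s hu)

-- A's per-group distinct-point count equals the length of B's union fold
lemma lenA_eq (d : PySem.Dict Int (List Int)) (g : List Int) :
    (PySem.Set.ofList (g.foldl (fun acc p => acc ++ d.getD p []) [])).length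
      = (pvUfold (g.map (fun p => PySem.Set.ofList (d.getD p []))) []).length := by
  have hperm : (PySem.Set.ofList (g.foldl (fun acc p => acc ++ d.getD p []) [])).Perm
      (pvUfold (g.map (fun p => PySem.Set.ofList (d.getD p []))) []) := by
    rw [List.perm_ext_iff_of_nodup (PySem.Set.nodup_ofList _) (nodup_pvUfold _ _ List.nodup_nil)]
    intro x
    rw [PySem.Set.mem_ofList, PySem.List.foldl_append_eq_flatMap, mem_pvUfold]
    simp [PySem.Set.mem_ofList]
  exact hperm.length_eq

-- the minimal-size witness predicate both programs decide
def pvGood (d : PySem.Dict Int (List Int)) (m : Nat) : Prop :=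
  ∃ g : List Int, g.Sublist d.keys ∧ g.length = m ∧ pvTestA d g = true

lemma pvAnyA_iff (d : PySem.Dict Int (List Int)) (k : Int) :
    pvAnyA d k = true ↔ pvGood d k.toNat := by
  simp only [pvAnyA, pvGood, List.any_eq_true, PySem.List.mem_combinations_iff]
  tauto

-- upper bound: the DFS result is at most any witness's cost
lemma pvGoB_le (limit : Int) (rest : List (PySem.Set Int)) :
    ∀ (t : List (PySem.Set Int)) (union : PySem.Set Int) (used : Int), union.Nodup →
      t.Sublist rest → (pvUfold t union).length = 4 → used + t.length ≤ limit →
      pvGoB limit rest union used ≤ used + t.length := by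
  induction rest with
  | nil =>
      intro t union used hu hsub hlen hb
      have ht : t = [] := List.sublist_nil.mp hsub
      subst ht
      simp only [pvUfold, List.foldl_nil] at hlen
      rw [pvGoB]
      simp [hlen]
  | cons s tail ih =>
      intro t union used hu hsub hlen hb
      rw [pvGoB]
      by_cases h4 : union.length = 4
      · rw [if_pos h4]
        have : (0:Int) ≤ t.length := Int.natCast_nonneg _
        omega
      · rw [if_neg h4]
        by_cases hl : limit ≤ used
        · exfalso
          have ht : t = [] := by
            cases t with
            | nil => rfl
            | cons a b => exfalso; simp only [List.length_cons] at hb; omega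
          subst ht
          simp only [pvUfold, List.foldl_nil] at hlen
          exact h4 hlen
        · rw [if_neg hl]
          rcases List.sublist_cons_iff.mp hsub with htail | ⟨t', rfl, ht'⟩
          · -- t avoids s: the skip branch already meets the bound
            have hskip := ih t union used hu htail hlen hb
            by_cases hu2 : (PySem.Set.union union s).length ≤ 4
            · simp only [if_pos hu2]
              exact le_trans (min_le_left _ _) hskip
            · simp only [if_neg hu2]
              exact hskip
          · -- t takes s: the take branch is admissible and meets the bound
            have hsubset : (PySem.Set.union union s) ⊆ pvUfold (s :: t') union := by
              intro x hx
              rcases (PySem.Set.mem_union _ _ _).mp hx with hx | hx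
              · exact (mem_pvUfold _ _ _).mpr (Or.inl hx)
              · exact (mem_pvUfold _ _ _).mpr (Or.inr ⟨s, List.mem_cons_self .., hx⟩)
            have hu2 : (PySem.Set.union union s).length ≤ 4 := by
              have := pvLen_le_of_nodup_subset _ _ (PySem.Set.nodup_union union s hu) hsubset
              omega
            simp only [if_pos hu2]
            refine le_trans (min_le_right _ _) ?_
            have htake := ih t' (PySem.Set.union union s) (used + 1)
              (PySem.Set.nodup_union union s hu) ht' hlen (by simp at hb ⊢; omega)
            simp only [List.length_cons]
            push_cast at htake ⊢
            omega

-- exactness: the DFS result is 5 or realised by some witness within the bound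
lemma pvGoB_cases (limit : Int) (hlim : limit ≤ 4) (rest : List (PySem.Set Int)) :
    ∀ (union : PySem.Set Int) (used : Int), union.Nodup → (union.length = 4 → used ≤ limit) →
      pvGoB limit rest union used = 5 ∨
        ∃ t : List (PySem.Set Int), t.Sublist rest ∧ (pvUfold t union).length = 4 ∧
          pvGoB limit rest union used = used + t.length ∧ used + (t.length : Int) ≤ limit := by
  induction rest with
  | nil =>
      intro union used hu H
      rw [pvGoB]
      by_cases h4 : union.length = 4
      · right
        exact ⟨[], List.nil_sublist _, h4, by simp [h4], by simpa using H h4⟩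
      · left; simp [h4]
  | cons s tail ih =>
      intro union used hu H
      rw [pvGoB]
      by_cases h4 : union.length = 4
      · right
        exact ⟨[], List.nil_sublist _, h4, by simp [h4], by simpa using H h4⟩
      · rw [if_neg h4]
        by_cases hl : limit ≤ used
        · left; simp [hl]
        · rw [if_neg hl]
          have ihs := ih union used hu (fun h => absurd h h4)
          by_cases hu2 : (PySem.Set.union union s).length ≤ 4
          · have iht := ih (PySem.Set.union union s) (used + 1)
              (PySem.Set.nodup_union union s hu) (fun _ => by omega)
            simp only [if_pos hu2]
            rcases ihs with h5 | ⟨t, hts, hlen, heq, hble⟩ <;>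
              rcases iht with h5' | ⟨t', hts', hlen', heq', hble'⟩
            · left; rw [h5, h5']; exact min_self 5
            · right
              refine ⟨s :: t', List.cons_sublist_cons.mpr hts', hlen', ?_, ?_⟩
              · rw [h5, heq']
                simp only [List.length_cons]
                push_cast
                have : used + 1 + (t'.length : Int) ≤ limit := hble'
                omega
              · simp only [List.length_cons]; push_cast; omega
            · right
              refine ⟨t, List.sublist_cons_of_sublist s hts, hlen, ?_, hble⟩
              rw [heq, h5']
              omega
            · -- both branches realised: the min is whichever is smaller
              by_cases hcmp : used + (t.length : Int) ≤ used + 1 + (t'.length : Int)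
              · right
                refine ⟨t, List.sublist_cons_of_sublist s hts, hlen, ?_, hble⟩
                rw [heq, heq']
                omega
              · right
                refine ⟨s :: t', List.cons_sublist_cons.mpr hts', hlen', ?_, ?_⟩
                · rw [heq, heq']
                  simp only [List.length_cons]
                  push_cast
                  omega
                · simp only [List.length_cons]; push_cast; omega
          · simp only [if_neg hu2]
            rcases ihs with h5 | ⟨t, hts, hlen, heq, hble⟩
            · left; exact h5
            · right; exact ⟨t, List.sublist_cons_of_sublist s hts, hlen, heq, hble⟩

-- a find? hit on a strictly increasing list refutes the predicate below it
lemma pvFind_min {p : Int → Bool} {l : List Int} {a : Int} (hp : l.Pairwise (· < ·))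
    (h : l.find? p = some a) : ∀ b ∈ l, b < a → ¬ p b = true := by
  obtain ⟨hpa, l1, l2, hl, hnot⟩ := List.find?_eq_some_iff_append.mp h
  subst hl
  intro b hb hba
  rcases List.mem_append.mp hb with hb1 | hb2
  · intro hpb
    have := hnot b hb1
    simp [hpb] at this
  · rcases List.mem_cons.mp hb2 with rfl | hb2
    · omega
    · have := (List.pairwise_append.mp hp).2.1
      have := (List.pairwise_cons.mp this).1 b hb2
      omega

-- pvGood 0 never holds (the empty union has 0 distinct points)
lemma pvGood_zero (d : PySem.Dict Int (List Int)) : ¬ pvGood d 0 := by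
  rintro ⟨g, _, hg, htest⟩
  rw [List.length_eq_zero_iff] at hg
  subst hg
  simp [pvTestA] at htest

-- ===== VERDICT (by name: the statement is the Claim_ definition above) =====
theorem minimum_cranes_spec : Claim_equal_minimum_cranes := by
  intro cranes n _
  unfold Spec_minimum_cranes
  simp only [minimum_cranes, minimum_cranes_alt]
  have hnd : (PySem.Dict.ofList cranes).keys.Nodup := PySem.Dict.nodup_keys_ofList cranes
  set d := PySem.Dict.ofList cranes with hd
  set f : Int → PySem.Set Int := fun p => PySem.Set.ofList (d.getD p []) with hf
  have hvals : d.values.map (fun v => PySem.Set.ofList v) = d.keys.map f := by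
    rw [PySem.Dict.values_eq_map_keys d hnd []]
    simp [hf, List.map_map, Function.comp]
  set limit : Int := min n 4 with hlimit
  have hrange : min (n + 1) 5 = limit + 1 := by omega
  rw [hvals, hrange]
  have hlim4 : limit ≤ 4 := by omega
  -- witnesses transfer between A's combinations over keys and B's sublists of sets
  have hback : ∀ t : List (PySem.Set Int), t.Sublist (d.keys.map f) →
      (pvUfold t []).length = 4 → pvGood d t.length := by
    intro t hts hlen
    obtain ⟨g, hg, rfl⟩ := List.sublist_map_iff.mp hts
    refine ⟨g, hg, by simp, ?_⟩
    simp only [pvTestA, beq_iff_eq]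
    rw [lenA_eq]
    exact hlen
  have hfwd : ∀ m : Nat, pvGood d m → ∃ t : List (PySem.Set Int),
      t.Sublist (d.keys.map f) ∧ (pvUfold t []).length = 4 ∧ t.length = m := by
    rintro m ⟨g, hg, rfl, htest⟩
    refine ⟨g.map f, List.Sublist.map f hg, ?_, by simp⟩
    simp only [pvTestA, beq_iff_eq] at htest
    rw [← lenA_eq]
    exact htest
  cases hfind : (PySem.List.pyRange 1 (limit + 1) 1).find? (pvAnyA d) with
  | none =>
      have hnone := List.find?_eq_none.mp hfind
      rcases pvGoB_cases limit hlim4 (d.keys.map f) [] 0 List.nodup_nil (by simp) with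
        h5 | ⟨t, hts, hlen, heq, hble⟩
      · rw [h5]
        rw [if_neg (by omega)]
      · exfalso
        have hgood := hback t hts hlen
        have ht1 : 1 ≤ t.length := by
          rcases Nat.eq_zero_or_pos t.length with h0 | h1
          · exact absurd (h0 ▸ hgood) (pvGood_zero d)
          · exact h1
        have hmem : (t.length : Int) ∈ PySem.List.pyRange 1 (limit + 1) 1 := by
          rw [PySem.List.mem_pyRange_one]
          omega
        have := hnone _ hmem
        rw [pvAnyA_iff] at this
        simp only [Int.toNat_natCast] at this
        exact this hgood
  | some k =>
      have hpk := List.find?_some hfind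
      have hmemk := List.mem_of_find?_eq_some hfind
      rw [PySem.List.mem_pyRange_one] at hmemk
      have hmin := pvFind_min (PySem.List.pairwise_lt_pyRange_one 1 (limit + 1)) hfind
      rw [pvAnyA_iff] at hpk
      obtain ⟨t, hts, hlen, htl⟩ := hfwd _ hpk
      have hle : pvGoB limit (d.keys.map f) [] 0 ≤ (k : Int) := by
        have := pvGoB_le limit (d.keys.map f) t [] 0 List.nodup_nil hts hlen
          (by rw [htl]; omega)
        rw [htl] at this
        omega
      have heq : pvGoB limit (d.keys.map f) [] 0 = k := by
        rcases pvGoB_cases limit hlim4 (d.keys.map f) [] 0 List.nodup_nil (by simp) with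
          h5 | ⟨t', hts', hlen', heq', hble'⟩
        · omega
        · have hgood' := hback t' hts' hlen'
          have ht1 : 1 ≤ t'.length := by
            rcases Nat.eq_zero_or_pos t'.length with h0 | h1
            · exact absurd (h0 ▸ hgood') (pvGood_zero d)
            · exact h1
          have hnotlt : ¬ ((t'.length : Int) < k) := by
            intro hlt
            have hmem : (t'.length : Int) ∈ PySem.List.pyRange 1 (limit + 1) 1 := by
              rw [PySem.List.mem_pyRange_one]; omega
            have := hmin _ hmem hlt
            rw [pvAnyA_iff] at this
            simp only [Int.toNat_natCast] at this
            exact this hgood'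
          omega
      rw [heq, if_pos (by omega)]
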